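-- pv_equiv track=rewrite | github.com/antho77m/Azul | Azul_graph.py | detecte_co_souris_plancher
-- ===== SOURCE A (Python) =====
-- def detecte_co_souris_plancher(ax,ay,coordonne):
--     bx=ax+50
--     by=ay+50
--     position_souris=-1
--     for i in range(7):
--         if ax<coordonne[0] and coordonne[0]<bx and ay<coordonne[1] and coordonne[1]<by:
--                 position_souris= (i)
--         ax=ax+50
--         bx=bx+50
--     return position_souris
-- ===== SOURCE B (Python) =====
-- def detecte_co_souris_plancher(ax, ay, coordonne):
--     if not (ay < coordonne[1] < ay + 50):
--         return -1
--     d = coordonne[0] - ax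
--     if d <= 0 or d >= 350 or d % 50 == 0:
--         return -1
--     return d // 50
-- ===== Notes on version B (the rewrite author's own statement) =====
-- stated objective: simpler
-- what changed: Replaced the 7-iteration scan over shifting 50px cells with a direct arithmetic computation: test the y-band once, then compute the cell index as (x-ax)//50 with strict-boundary guards.
import Mathlib
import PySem

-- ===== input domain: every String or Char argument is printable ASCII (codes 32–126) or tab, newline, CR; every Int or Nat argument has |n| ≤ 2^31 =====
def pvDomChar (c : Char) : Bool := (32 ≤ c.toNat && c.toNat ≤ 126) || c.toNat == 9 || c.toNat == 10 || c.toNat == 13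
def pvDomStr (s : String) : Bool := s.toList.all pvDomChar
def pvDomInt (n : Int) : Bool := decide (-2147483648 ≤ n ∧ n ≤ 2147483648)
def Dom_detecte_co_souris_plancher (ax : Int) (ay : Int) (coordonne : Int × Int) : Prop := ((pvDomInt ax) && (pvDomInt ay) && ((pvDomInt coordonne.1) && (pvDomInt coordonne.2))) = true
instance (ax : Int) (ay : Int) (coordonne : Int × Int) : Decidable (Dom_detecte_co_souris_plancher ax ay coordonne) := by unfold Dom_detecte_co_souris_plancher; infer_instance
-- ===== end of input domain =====

-- B replaces A's 7-iteration scan over shifting 50px cells by one arithmetic index computation (simpler, O(1) without the loop).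
-- ===== PORT A =====
def detecte_co_souris_plancher (ax : Int) (ay : Int) (coordonne : Int × Int) : Int :=
  let bx := ax + 50
  let by' := ay + 50
  let position_souris : Int := -1
  let st := (PySem.List.pyRange 0 7 1).foldl
    (fun (st : Int × Int × Int) (i : Int) =>
      let (ax, bx, position_souris) := st
      let position_souris :=
        if ax < coordonne.1 ∧ coordonne.1 < bx ∧ ay < coordonne.2 ∧ coordonne.2 < by' then i
        else position_souris
      (ax + 50, bx + 50, position_souris))
    (ax, bx, position_souris)
  st.2.2

-- ===== PORT B =====
def detecte_co_souris_plancher_alt (ax : Int) (ay : Int) (coordonne : Int × Int) : Int :=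
  if ¬ (ay < coordonne.2 ∧ coordonne.2 < ay + 50) then -1
  else
    let d := coordonne.1 - ax
    if d ≤ 0 ∨ 350 ≤ d ∨ PySem.Int.mod d 50 = 0 then -1
    else PySem.Int.floordiv d 50

-- ===== PRECONDITION & SPEC =====
def Spec_detecte_co_souris_plancher (ax : Int) (ay : Int) (coordonne : Int × Int) (out : Int) : Prop := out = detecte_co_souris_plancher_alt ax ay coordonne
instance (ax : Int) (ay : Int) (coordonne : Int × Int) (out : Int) : Decidable (Spec_detecte_co_souris_plancher ax ay coordonne out) := by unfold Spec_detecte_co_souris_plancher; infer_instance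

-- ===== CLAIM (what is proved, stated in full; the proofs are below) =====
def Claim_equal_detecte_co_souris_plancher : Prop := ∀ (ax : Int) (ay : Int) (coordonne : Int × Int), Dom_detecte_co_souris_plancher ax ay coordonne → Spec_detecte_co_souris_plancher ax ay coordonne (detecte_co_souris_plancher ax ay coordonne)

-- ===== LEMMAS AND PROOFS =====

-- ===== VERDICT (by name: the statement is the Claim_ definition above) =====
theorem detecte_co_souris_plancher_spec : Claim_equal_detecte_co_souris_plancher := by
  intro ax ay c _
  unfold Spec_detecte_co_souris_plancher detecte_co_souris_plancher detecte_co_souris_plancher_alt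
  rw [show PySem.List.pyRange 0 7 1 = [0,1,2,3,4,5,6] from by decide]
  simp only [PySem.Int.mod_eq_emod_of_pos (by omega : (0:Int) < 50), PySem.Int.floordiv_eq_ediv_of_pos (by omega : (0:Int) < 50)]
  simp only [List.foldl]
  split_ifs <;> omega
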